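-- pv_equiv track=rewrite | github.com/JaeHyun-Lim-dev/Algorithm | kakao/main.py | truck_drive
-- ===== SOURCE A (Python) =====
-- edge = 5
--
-- def truck_drive(_i, _j): # i to j, 상하차는 loop에서 하는걸로
--     res = []
--     if _i < _j:
--         while _i//edge < _j//edge:
--             _i += edge
--             res.append(2)
--         while _i < _j:
--             res.append(1)
--             _i += 1
--         while _i > _j:
--             res.append(3)
--             _i -= 1
--     else:
--         while _i//edge > _j//edge:
--             res.append(4)
--             _i -= edge
--         while _i < _j:
--             res.append(1)
--             _i += 1
--         while _i > _j:
--             res.append(3)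
--             _i -= 1
--     return res
-- ===== SOURCE B (Python) =====
-- edge = 5
--
-- def truck_drive(_i, _j):
--     if _i < _j:
--         k = _j // edge - _i // edge
--         big = [2] * k
--         diff = _j - (_i + k * edge)
--     else:
--         k = _i // edge - _j // edge
--         big = [4] * k
--         diff = _j - (_i - k * edge)
--     if diff > 0:
--         return big + [1] * diff
--     return big + [3] * (-diff)
-- ===== Notes on version B (the rewrite author's own statement) =====
-- stated objective: simpler
-- what changed: Replaces A's four incremental while-loops with closed-form arithmetic: the big-step count and the residual step count are computed directly and the result is built by list multiplication.
import Mathlib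
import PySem

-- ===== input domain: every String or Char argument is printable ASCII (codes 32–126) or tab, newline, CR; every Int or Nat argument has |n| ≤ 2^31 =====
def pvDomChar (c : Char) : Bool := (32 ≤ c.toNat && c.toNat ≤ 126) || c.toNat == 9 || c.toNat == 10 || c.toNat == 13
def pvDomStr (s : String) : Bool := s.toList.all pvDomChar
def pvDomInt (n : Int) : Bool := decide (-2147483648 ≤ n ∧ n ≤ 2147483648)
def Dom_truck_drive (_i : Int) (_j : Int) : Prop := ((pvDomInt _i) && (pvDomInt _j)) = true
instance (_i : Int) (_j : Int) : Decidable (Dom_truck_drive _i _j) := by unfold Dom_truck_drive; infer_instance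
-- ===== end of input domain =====

-- B replaces A's four while-loops with closed-form counts and list replication (simpler; same return values).


-- ===== PORT A =====
-- while _i//edge < _j//edge: _i += edge; res.append(2)
def pvBigUp (i j : Int) (res : List Int) : Int × List Int :=
  if PySem.Int.floordiv i 5 < PySem.Int.floordiv j 5 then
    pvBigUp (i + 5) j (res ++ [2])
  else (i, res)
termination_by (PySem.Int.floordiv j 5 - PySem.Int.floordiv i 5).toNat
decreasing_by
  have : PySem.Int.floordiv (i + 5) 5 = PySem.Int.floordiv i 5 + 1 := by
    rw [PySem.Int.floordiv_eq_iff_of_pos (by omega)]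
    have h1 := PySem.Int.floordiv_mul_add_mod i 5
    have h2 := PySem.Int.mod_nonneg i (b := 5) (by omega)
    have h3 := PySem.Int.mod_lt i (b := 5) (by omega)
    omega
  omega

-- while _i//edge > _j//edge: res.append(4); _i -= edge
def pvBigDown (i j : Int) (res : List Int) : Int × List Int :=
  if PySem.Int.floordiv i 5 > PySem.Int.floordiv j 5 then
    pvBigDown (i - 5) j (res ++ [4])
  else (i, res)
termination_by (PySem.Int.floordiv i 5 - PySem.Int.floordiv j 5).toNat
decreasing_by
  have : PySem.Int.floordiv (i - 5) 5 = PySem.Int.floordiv i 5 - 1 := by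
    rw [PySem.Int.floordiv_eq_iff_of_pos (by omega)]
    have h1 := PySem.Int.floordiv_mul_add_mod i 5
    have h2 := PySem.Int.mod_nonneg i (b := 5) (by omega)
    have h3 := PySem.Int.mod_lt i (b := 5) (by omega)
    omega
  omega

-- while _i < _j: res.append(1); _i += 1
def pvUp (i j : Int) (res : List Int) : Int × List Int :=
  if i < j then pvUp (i + 1) j (res ++ [1]) else (i, res)
termination_by (j - i).toNat

-- while _i > _j: res.append(3); _i -= 1
def pvDown (i j : Int) (res : List Int) : Int × List Int :=
  if i > j then pvDown (i - 1) j (res ++ [3]) else (i, res)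
termination_by (i - j).toNat

def truck_drive (_i : Int) (_j : Int) : List Int :=
  if _i < _j then
    let s1 := pvBigUp _i _j []
    let s2 := pvUp s1.1 _j s1.2
    let s3 := pvDown s2.1 _j s2.2
    s3.2
  else
    let s1 := pvBigDown _i _j []
    let s2 := pvUp s1.1 _j s1.2
    let s3 := pvDown s2.1 _j s2.2
    s3.2

-- ===== PORT B =====
def truck_drive_alt (_i : Int) (_j : Int) : List Int :=
  let (big, diff) :=
    if _i < _j then
      let k := PySem.Int.floordiv _j 5 - PySem.Int.floordiv _i 5
      (List.replicate k.toNat (2 : Int), _j - (_i + k * 5))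
    else
      let k := PySem.Int.floordiv _i 5 - PySem.Int.floordiv _j 5
      (List.replicate k.toNat (4 : Int), _j - (_i - k * 5))
  if diff > 0 then big ++ List.replicate diff.toNat 1
  else big ++ List.replicate (-diff).toNat 3

-- ===== PRECONDITION & SPEC =====
def Spec_truck_drive (_i : Int) (_j : Int) (out : List Int) : Prop := out = truck_drive_alt _i _j
instance (_i : Int) (_j : Int) (out : List Int) : Decidable (Spec_truck_drive _i _j out) := by unfold Spec_truck_drive; infer_instance

-- ===== CLAIM (what is proved, stated in full; the proofs are below) =====
def Claim_equal_truck_drive : Prop := ∀ (_i : Int) (_j : Int), Dom_truck_drive _i _j → Spec_truck_drive _i _j (truck_drive _i _j)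

-- ===== LEMMAS AND PROOFS =====

theorem pvFdiv_succ (i : Int) : PySem.Int.floordiv (i + 5) 5 = PySem.Int.floordiv i 5 + 1 := by
  rw [PySem.Int.floordiv_eq_iff_of_pos (by omega)]
  have h1 := PySem.Int.floordiv_mul_add_mod i 5
  have h2 := PySem.Int.mod_nonneg i (b := 5) (by omega)
  have h3 := PySem.Int.mod_lt i (b := 5) (by omega)
  omega

theorem pvFdiv_pred (i : Int) : PySem.Int.floordiv (i - 5) 5 = PySem.Int.floordiv i 5 - 1 := by
  rw [PySem.Int.floordiv_eq_iff_of_pos (by omega)]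
  have h1 := PySem.Int.floordiv_mul_add_mod i 5
  have h2 := PySem.Int.mod_nonneg i (b := 5) (by omega)
  have h3 := PySem.Int.mod_lt i (b := 5) (by omega)
  omega

theorem pvBigUp_eq (i j : Int) (res : List Int) :
    pvBigUp i j res =
      (i + 5 * ((PySem.Int.floordiv j 5 - PySem.Int.floordiv i 5).toNat : Int),
       res ++ List.replicate (PySem.Int.floordiv j 5 - PySem.Int.floordiv i 5).toNat 2) := by
  fun_induction pvBigUp i j res with
  | case1 i res h ih =>
    rw [ih]
    have hs := pvFdiv_succ i
    have hlt : PySem.Int.floordiv i 5 < PySem.Int.floordiv j 5 := h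
    simp only [Prod.mk.injEq]
    refine ⟨by omega, ?_⟩
    have ht : (PySem.Int.floordiv j 5 - PySem.Int.floordiv i 5).toNat
        = (PySem.Int.floordiv j 5 - PySem.Int.floordiv (i + 5) 5).toNat + 1 := by omega
    rw [ht, List.replicate_succ, List.append_assoc]
    rfl
  | case2 i res h =>
    have h0 : (PySem.Int.floordiv j 5 - PySem.Int.floordiv i 5).toNat = 0 := by omega
    rw [h0]
    simp only [Nat.cast_zero, mul_zero, add_zero, List.replicate_zero, List.append_nil]

theorem pvBigDown_eq (i j : Int) (res : List Int) :
    pvBigDown i j res =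
      (i - 5 * ((PySem.Int.floordiv i 5 - PySem.Int.floordiv j 5).toNat : Int),
       res ++ List.replicate (PySem.Int.floordiv i 5 - PySem.Int.floordiv j 5).toNat 4) := by
  fun_induction pvBigDown i j res with
  | case1 i res h ih =>
    rw [ih]
    have hs := pvFdiv_pred i
    have hlt : PySem.Int.floordiv j 5 < PySem.Int.floordiv i 5 := h
    simp only [Prod.mk.injEq]
    refine ⟨by omega, ?_⟩
    have ht : (PySem.Int.floordiv i 5 - PySem.Int.floordiv j 5).toNat
        = (PySem.Int.floordiv (i - 5) 5 - PySem.Int.floordiv j 5).toNat + 1 := by omega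
    rw [ht, List.replicate_succ, List.append_assoc]
    rfl
  | case2 i res h =>
    have h0 : (PySem.Int.floordiv i 5 - PySem.Int.floordiv j 5).toNat = 0 := by omega
    rw [h0]
    simp only [Nat.cast_zero, mul_zero, sub_zero, List.replicate_zero, List.append_nil]

theorem pvUp_eq (i j : Int) (res : List Int) :
    pvUp i j res = (i + ((j - i).toNat : Int), res ++ List.replicate (j - i).toNat 1) := by
  fun_induction pvUp i j res with
  | case1 i res h ih =>
    rw [ih]
    simp only [Prod.mk.injEq]
    refine ⟨by omega, ?_⟩
    rw [List.append_assoc]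
    congr 1
    have : (j - i).toNat = (j - (i + 1)).toNat + 1 := by omega
    rw [this, List.replicate_succ]
    rfl
  | case2 i res h =>
    have : (j - i).toNat = 0 := by omega
    simp [this]

theorem pvDown_eq (i j : Int) (res : List Int) :
    pvDown i j res = (i - ((i - j).toNat : Int), res ++ List.replicate (i - j).toNat 3) := by
  fun_induction pvDown i j res with
  | case1 i res h ih =>
    rw [ih]
    simp only [Prod.mk.injEq]
    refine ⟨by omega, ?_⟩
    rw [List.append_assoc]
    congr 1
    have : (i - j).toNat = ((i - 1) - j).toNat + 1 := by omega
    rw [this, List.replicate_succ]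
    rfl
  | case2 i res h =>
    have : (i - j).toNat = 0 := by omega
    simp [this]

theorem pvFdiv_mono {a b : Int} (h : a ≤ b) :
    PySem.Int.floordiv a 5 ≤ PySem.Int.floordiv b 5 := by
  have ha1 := PySem.Int.floordiv_mul_add_mod a 5
  have ha2 := PySem.Int.mod_nonneg a (b := 5) (by omega)
  have ha3 := PySem.Int.mod_lt a (b := 5) (by omega)
  have hb1 := PySem.Int.floordiv_mul_add_mod b 5
  have hb2 := PySem.Int.mod_nonneg b (b := 5) (by omega)
  have hb3 := PySem.Int.mod_lt b (b := 5) (by omega)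
  nlinarith

-- small-step tail (up then down) equals B's diff branch
theorem pvTail_eq (i1 j : Int) (big : List Int) :
    (pvDown (pvUp i1 j big).1 j (pvUp i1 j big).2).2 =
      (if j - i1 > 0 then big ++ List.replicate (j - i1).toNat 1
       else big ++ List.replicate (-(j - i1)).toNat 3) := by
  rw [pvUp_eq, pvDown_eq]
  by_cases h : j - i1 > 0
  · have h2 : ((i1 + ((j - i1).toNat : Int)) - j).toNat = 0 := by omega
    rw [h2, if_pos h]
    simp only [List.replicate_zero, List.append_nil]
  · have h2 : (j - i1).toNat = 0 := by omega
    have h3 : ((i1 + ((j - i1).toNat : Int)) - j).toNat = (-(j - i1)).toNat := by omega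
    show big ++ List.replicate (j - i1).toNat 1 ++
        List.replicate ((i1 + ((j - i1).toNat : Int)) - j).toNat 3 = _
    rw [h3, h2, if_neg h]
    simp only [List.replicate_zero, List.append_nil]

-- ===== VERDICT (by name: the statement is the Claim_ definition above) =====
theorem truck_drive_spec : Claim_equal_truck_drive := by
  intro i j _
  unfold Spec_truck_drive truck_drive truck_drive_alt
  by_cases hij : i < j
  · simp only [hij, if_true]
    rw [pvBigUp_eq, pvTail_eq]
    have hk : ((PySem.Int.floordiv j 5 - PySem.Int.floordiv i 5).toNat : Int)
        = PySem.Int.floordiv j 5 - PySem.Int.floordiv i 5 := by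
      have := pvFdiv_mono (a := i) (b := j) (by omega)
      omega
    rw [hk]
    ring_nf
    simp only [List.nil_append]
  · simp only [hij, if_false]
    rw [pvBigDown_eq, pvTail_eq]
    have hk : ((PySem.Int.floordiv i 5 - PySem.Int.floordiv j 5).toNat : Int)
        = PySem.Int.floordiv i 5 - PySem.Int.floordiv j 5 := by
      have := pvFdiv_mono (a := j) (b := i) (by omega)
      omega
    rw [hk]
    ring_nf
    simp only [List.nil_append]
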